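-- pv_equiv track=rewrite | github.com/Nikitosishe/bimbimbambam | practicum 9/8.py | count_square_sums
-- ===== SOURCE A (Python) =====
-- import math
--
-- def count_square_sums(x):
--     count = 0
--     max_a = int(math.isqrt(x))
--
--     for a in range(1, max_a + 1):
--         a_squared = a * a
--         remaining = x - a_squared
--
--         if remaining <= 0:
--             continue
--
--         b = math.isqrt(remaining)
--         if b * b == remaining and b >= a:
--             count += 1
--
--     return count
-- ===== SOURCE B (Python) =====
-- import math
--
-- def count_square_sums(x):
--     a = 1
--     b = math.isqrt(x)
--     count = 0
--     while a <= b: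
--         s = a * a + b * b
--         if s == x:
--             count += 1
--             a += 1
--             b -= 1
--         elif s < x:
--             a += 1
--         else:
--             b -= 1
--     return count
-- ===== Notes on version B (the rewrite author's own statement) =====
-- stated objective: alternative
-- what changed: Replaces the per-candidate isqrt probe (one integer square root for every a in 1..isqrt(x)) by a two-pointer scan that converges a upward and b downward using only additions and comparisons; both are O(sqrt(x)) and too fast to time apart.
import Mathlib
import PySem

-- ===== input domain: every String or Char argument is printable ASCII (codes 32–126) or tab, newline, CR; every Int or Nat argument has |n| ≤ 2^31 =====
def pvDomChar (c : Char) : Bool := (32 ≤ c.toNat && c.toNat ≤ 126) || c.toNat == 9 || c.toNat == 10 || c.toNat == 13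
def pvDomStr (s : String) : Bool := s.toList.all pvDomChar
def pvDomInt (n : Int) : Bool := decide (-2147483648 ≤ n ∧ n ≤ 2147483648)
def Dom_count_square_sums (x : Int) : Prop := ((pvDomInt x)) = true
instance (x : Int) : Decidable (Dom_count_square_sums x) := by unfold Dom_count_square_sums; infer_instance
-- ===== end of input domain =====

-- B replaces A's per-candidate isqrt probe by a two-pointer scan (a up, b down): an alternative algorithm of the same O(sqrt(x)) cost.

-- math.isqrt(x): exact for 0 ≤ x (Pre_ excludes x < 0, where Python raises ValueError)
def isqrtI (x : Int) : Int := Int.ofNat (Nat.sqrt x.toNat)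

-- ===== PORT A =====
def count_square_sums (x : Int) : Int :=
  let max_a := isqrtI x
  (PySem.List.pyRange 1 (max_a + 1) 1).foldl (fun count a =>
    let a_squared := a * a
    let remaining := x - a_squared
    if remaining ≤ 0 then count
    else
      let b := isqrtI remaining
      if b * b = remaining ∧ a ≤ b then count + 1 else count) 0

-- ===== PORT B =====
-- the while-loop, made total with a fuel bound (each step shrinks the window [a,b] by at least 1)
def twoPtrLoop (x : Int) : Nat → Int → Int → Int → Int
  | 0, _, _, count => count
  | Nat.succ n, a, b, count =>
    if a ≤ b then
      let s := a * a + b * b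
      if s = x then twoPtrLoop x n (a + 1) (b - 1) (count + 1)
      else if s < x then twoPtrLoop x n (a + 1) b count
      else twoPtrLoop x n a (b - 1) count
    else count

def count_square_sums_alt (x : Int) : Int := twoPtrLoop x (isqrtI x).toNat 1 (isqrtI x) 0

-- ===== PRECONDITION & SPEC =====
-- Pre_ excludes x < 0, where Python's math.isqrt raises ValueError in both A and B.
def Pre_count_square_sums (x : Int) : Prop := 0 ≤ x
instance (x : Int) : Decidable (Pre_count_square_sums x) := by unfold Pre_count_square_sums; infer_instance
def pvWitness_count_square_sums : Int := (5)

def Spec_count_square_sums (x : Int) (out : Int) : Prop := out = count_square_sums_alt x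
instance (x : Int) (out : Int) : Decidable (Spec_count_square_sums x out) := by unfold Spec_count_square_sums; infer_instance

-- ===== CLAIM (what is proved, stated in full; the proofs are below) =====
def Claim_equal_count_square_sums : Prop := ∀ (x : Int), Dom_count_square_sums x → Pre_count_square_sums x → Spec_count_square_sums x (count_square_sums x)

-- ===== LEMMAS AND PROOFS =====

-- the set both programs count: pairs (p₁,p₂), a ≤ p₁ ≤ p₂ ≤ b, p₁² + p₂² = x
noncomputable def pairSet (x a b : Int) : Finset (Int × Int) :=
  (Finset.Icc a b ×ˢ Finset.Icc a b).filter (fun p => p.1 ≤ p.2 ∧ p.1 * p.1 + p.2 * p.2 = x)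

lemma mem_pairSet {x a b : Int} {p : Int × Int} :
    p ∈ pairSet x a b ↔ a ≤ p.1 ∧ p.1 ≤ p.2 ∧ p.2 ≤ b ∧ p.1 * p.1 + p.2 * p.2 = x := by
  simp only [pairSet, Finset.mem_filter, Finset.mem_product, Finset.mem_Icc]
  constructor
  · rintro ⟨⟨⟨h1, _⟩, _, h4⟩, h5, h6⟩; exact ⟨h1, h5, h4, h6⟩
  · rintro ⟨h1, h2, h3, h4⟩; exact ⟨⟨⟨h1, le_trans h2 h3⟩, le_trans h1 h2, h3⟩, h2, h4⟩

lemma pairSet_empty {x a b : Int} (h : b < a) : pairSet x a b = ∅ := by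
  ext p; simp only [mem_pairSet, Finset.notMem_empty, iff_false]
  rintro ⟨h1, h2, h3, _⟩; omega

lemma sq_inj {p q : Int} (hp : 0 ≤ p) (hq : 0 ≤ q) (h : p * p = q * q) : p = q := by nlinarith

lemma pairSet_lt {x a b : Int} (ha : 1 ≤ a) (hx : a * a + b * b < x) :
    pairSet x a b = pairSet x (a + 1) b := by
  ext p
  simp only [mem_pairSet]
  constructor
  · rintro ⟨h1, h2, h3, h4⟩
    refine ⟨?_, h2, h3, h4⟩
    rcases lt_or_ge a p.1 with h | h
    · omega
    · exfalso; have hpa : p.1 = a := le_antisymm h h1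
      nlinarith
  · rintro ⟨h1, h2, h3, h4⟩; exact ⟨by omega, h2, h3, h4⟩

lemma pairSet_gt {x a b : Int} (ha : 1 ≤ a) (hx : x < a * a + b * b) :
    pairSet x a b = pairSet x a (b - 1) := by
  ext p
  simp only [mem_pairSet]
  constructor
  · rintro ⟨h1, h2, h3, h4⟩
    refine ⟨h1, h2, ?_, h4⟩
    rcases lt_or_ge p.2 b with h | h
    · omega
    · exfalso; have hpb : p.2 = b := le_antisymm h3 h
      nlinarith
  · rintro ⟨h1, h2, h3, h4⟩; exact ⟨h1, h2, by omega, h4⟩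

lemma pairSet_hit {x a b : Int} (ha : 1 ≤ a) (hab : a ≤ b) (hx : a * a + b * b = x) :
    pairSet x a b = insert (a, b) (pairSet x (a + 1) (b - 1)) := by
  ext p
  simp only [mem_pairSet, Finset.mem_insert]
  constructor
  · rintro ⟨h1, h2, h3, h4⟩
    by_cases hpa : p.1 = a
    · left
      have h2' : p.2 = b := by
        apply sq_inj (by omega) (by omega); nlinarith
      exact Prod.ext hpa h2'
    · right
      have hfst : a + 1 ≤ p.1 := by omega
      refine ⟨hfst, h2, ?_, h4⟩
      rcases lt_or_ge p.2 b with h | h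
      · omega
      · exfalso
        have hpb : p.2 = b := le_antisymm h3 h
        have : p.1 = a := by
          apply sq_inj (by omega) (by omega); nlinarith
        exact hpa this
  · rintro (h | ⟨h1, h2, h3, h4⟩)
    · subst h; exact ⟨le_refl a, hab, le_refl b, hx⟩
    · exact ⟨by omega, h2, by omega, h4⟩

lemma hit_notMem {x a b : Int} : (a, b) ∉ pairSet x (a + 1) (b - 1) := by
  simp only [mem_pairSet]; rintro ⟨h1, h2, h3, _⟩; omega

-- B's loop counts the window (fuel n suffices as long as n ≥ window size)
lemma twoPtr_eq (x : Int) : ∀ n a b count, (b + 1 - a).toNat ≤ n → 1 ≤ a →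
    twoPtrLoop x n a b count = count + ((pairSet x a b).card : Int) := by
  intro n
  induction n with
  | zero =>
    intro a b count hn ha
    rw [twoPtrLoop, pairSet_empty (by omega)]
    simp
  | succ n ih =>
    intro a b count hn ha
    rw [twoPtrLoop]
    by_cases hab : a ≤ b
    · simp only [hab, if_true]
      by_cases hs : a * a + b * b = x
      · simp only [hs, if_true]
        rw [ih (a + 1) (b - 1) (count + 1) (by omega) (by omega)]
        rw [pairSet_hit ha hab hs, Finset.card_insert_of_notMem hit_notMem]
        push_cast; ring
      · simp only [hs, if_false]
        by_cases hlt : a * a + b * b < x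
        · simp only [hlt, if_true]
          rw [ih (a + 1) b count (by omega) (by omega)]
          rw [pairSet_lt ha hlt]
        · simp only [hlt, if_false]
          rw [ih a (b - 1) count (by omega) ha]
          rw [pairSet_gt (x := x) (a := a) (b := b) ha (by omega)]
    · simp only [hab, if_false]
      rw [pairSet_empty (by omega)]
      simp

-- isqrt facts
lemma isqrtI_exact {r p : Int} (hp : 0 ≤ p) (h : p * p = r) : isqrtI r = p := by
  have h2 : r = ((p.toNat * p.toNat : ℕ) : ℤ) := by
    push_cast [Int.toNat_of_nonneg hp]; omega
  have h3 : r.toNat = p.toNat * p.toNat := by rw [h2, Int.toNat_natCast]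
  simp only [isqrtI, h3, Nat.sqrt_eq]
  exact Int.toNat_of_nonneg hp

lemma le_isqrtI {x p : Int} (hp : 0 ≤ p) (h : p * p ≤ x) : p ≤ isqrtI x := by
  have hx : 0 ≤ x := le_trans (mul_nonneg hp hp) h
  have h1 : p.toNat * p.toNat ≤ x.toNat := by
    have : ((p.toNat * p.toNat : ℕ) : ℤ) ≤ ((x.toNat : ℕ) : ℤ) := by
      push_cast [Int.toNat_of_nonneg hp, Int.toNat_of_nonneg hx]; exact h
    exact_mod_cast this
  have h2 : p.toNat ≤ Nat.sqrt x.toNat := Nat.le_sqrt'.mpr (by simpa [pow_two] using h1)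
  calc p = (p.toNat : ℤ) := (Int.toNat_of_nonneg hp).symm
    _ ≤ (Nat.sqrt x.toNat : ℤ) := by exact_mod_cast h2
    _ = isqrtI x := rfl

-- if A's per-a test succeeds, (a, isqrt(x-a²)) is the unique pair with first coordinate a
lemma pairSet_head_pos {x a : Int} (_hx : 0 ≤ x) (ha : 1 ≤ a)
    (_hr : ¬ x - a * a ≤ 0) (hb : isqrtI (x - a * a) * isqrtI (x - a * a) = x - a * a)
    (hab : a ≤ isqrtI (x - a * a)) :
    pairSet x a (isqrtI x) =
      insert (a, isqrtI (x - a * a)) (pairSet x (a + 1) (isqrtI x)) := by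
  set b := isqrtI (x - a * a) with hbdef
  have hbm : b ≤ isqrtI x := le_isqrtI (by omega) (by nlinarith)
  ext p
  simp only [mem_pairSet, Finset.mem_insert]
  constructor
  · rintro ⟨h1, h2, h3, h4⟩
    by_cases hpa : p.1 = a
    · left
      have : p.2 = b := by apply sq_inj (by omega) (by omega); nlinarith
      exact Prod.ext hpa this
    · right; exact ⟨by omega, h2, h3, h4⟩
  · rintro (h | ⟨h1, h2, h3, h4⟩)
    · subst h
      exact ⟨le_refl a, hab, hbm, by dsimp only; nlinarith⟩
    · exact ⟨by omega, h2, h3, h4⟩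

lemma head_notMem {x a b c : Int} : (a, c) ∉ pairSet x (a + 1) b := by
  simp only [mem_pairSet]; rintro ⟨h1, h2, h3, _⟩; omega

-- if A's per-a test fails, no pair has first coordinate a
lemma pairSet_head_neg {x a : Int} (ha : 1 ≤ a)
    (hc : ¬ (¬ x - a * a ≤ 0 ∧ isqrtI (x - a * a) * isqrtI (x - a * a) = x - a * a ∧
            a ≤ isqrtI (x - a * a))) :
    pairSet x a (isqrtI x) = pairSet x (a + 1) (isqrtI x) := by
  ext p
  simp only [mem_pairSet]
  constructor
  · rintro ⟨h1, h2, h3, h4⟩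
    refine ⟨?_, h2, h3, h4⟩
    rcases lt_or_ge a p.1 with h | h
    · omega
    · exfalso
      have hpa : p.1 = a := le_antisymm h h1
      have hsq : p.2 * p.2 = x - a * a := by nlinarith
      have hbe : isqrtI (x - a * a) = p.2 := isqrtI_exact (by omega) hsq
      exact hc ⟨by nlinarith, by rw [hbe]; exact hsq, by omega⟩
  · rintro ⟨h1, h2, h3, h4⟩; exact ⟨by omega, h2, h3, h4⟩

-- A's fold counts the same window
lemma A_fold (x : Int) (hx : 0 ≤ x) : ∀ n a0, (isqrtI x + 1 - a0).toNat = n → 1 ≤ a0 →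
    ∀ c : Int,
    (PySem.List.pyRange a0 (isqrtI x + 1) 1).foldl (fun count a =>
      let a_squared := a * a
      let remaining := x - a_squared
      if remaining ≤ 0 then count
      else
        let b := isqrtI remaining
        if b * b = remaining ∧ a ≤ b then count + 1 else count) c
      = c + ((pairSet x a0 (isqrtI x)).card : Int) := by
  intro n
  induction n using Nat.strong_induction_on with
  | _ n ih =>
    intro a0 hn ha c
    by_cases hend : isqrtI x + 1 ≤ a0
    · rw [PySem.List.pyRange_one_eq_nil hend, pairSet_empty (by omega)]
      simp
    · rw [PySem.List.pyRange_one_cons (by omega), List.foldl_cons]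
      rw [ih (isqrtI x + 1 - (a0 + 1)).toNat (by omega) (a0 + 1) rfl (by omega)]
      by_cases hc : ¬ x - a0 * a0 ≤ 0 ∧ isqrtI (x - a0 * a0) * isqrtI (x - a0 * a0) = x - a0 * a0 ∧ a0 ≤ isqrtI (x - a0 * a0)
      · obtain ⟨h1, h2, h3⟩ := hc
        simp only [h1, if_false, h2, h3, and_self, if_true]
        rw [pairSet_head_pos hx ha h1 h2 h3, Finset.card_insert_of_notMem head_notMem]
        push_cast; ring
      · rw [pairSet_head_neg ha hc]
        by_cases h1 : x - a0 * a0 ≤ 0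
        · simp only [h1, if_true]
        · have : ¬ (isqrtI (x - a0 * a0) * isqrtI (x - a0 * a0) = x - a0 * a0 ∧ a0 ≤ isqrtI (x - a0 * a0)) := by tauto
          simp only [h1, if_false, this]

-- ===== VERDICT (by name: the statement is the Claim_ definition above) =====
theorem count_square_sums_spec : Claim_equal_count_square_sums := by
  intro x _ hpre
  unfold Spec_count_square_sums count_square_sums count_square_sums_alt
  rw [A_fold x hpre (isqrtI x + 1 - 1).toNat 1 rfl (by omega) 0,
      twoPtr_eq x (isqrtI x).toNat 1 (isqrtI x) 0 (by omega) (by omega)]
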